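-- pv_equiv track=rewrite | github.com/natimellino/Complementos-I | practica1.py | incidencia_a_lista
-- ===== SOURCE A (Python) =====
-- def lista_indices(lista, elemento):
--     indices = []
--     for i in range(0, len(lista)):
--         if lista[i] == elemento:
--             indices.append(i)
--     return indices
--
-- def incidencia_a_lista(matriz):
--     cantVertices = len(matriz[0])
--     cantAristas = len(matriz)
--     vertices = []
--     for j in range(0, cantVertices):
--         vertices.append(j)
--     aristas = []
--     grafo = (vertices, aristas)
--     for i in range(0, cantAristas):
--         for vertice in vertices:
--             arista = lista_indices(matriz[i], vertice)
--             if len(arista) == 2: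
--                 aristas.append(arista)
--     return grafo
-- ===== SOURCE B (Python) =====
-- def _row_edges(n, fila):
--     pos = {}
--     for j, x in enumerate(fila):
--         if 0 <= x < n:
--             pos[x] = pos.get(x, []) + [j]
--     edges = []
--     for v in sorted(pos):
--         g = pos[v]
--         if len(g) == 2:
--             edges.append(g)
--     return edges
--
-- def incidencia_a_lista(matriz):
--     n = len(matriz[0])
--     aristas = []
--     for fila in matriz:
--         aristas.extend(_row_edges(n, fila))
--     return (list(range(n)), aristas)
-- ===== Notes on version B (the rewrite author's own statement) =====
-- stated objective: faster
-- what changed: Instead of rescanning each row once per vertex (lista_indices for every v in 0..n-1), B makes one pass per row building a dict from in-range values to their column positions, then walks the dict keys in sorted order emitting the groups of size exactly 2.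
import Mathlib
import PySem

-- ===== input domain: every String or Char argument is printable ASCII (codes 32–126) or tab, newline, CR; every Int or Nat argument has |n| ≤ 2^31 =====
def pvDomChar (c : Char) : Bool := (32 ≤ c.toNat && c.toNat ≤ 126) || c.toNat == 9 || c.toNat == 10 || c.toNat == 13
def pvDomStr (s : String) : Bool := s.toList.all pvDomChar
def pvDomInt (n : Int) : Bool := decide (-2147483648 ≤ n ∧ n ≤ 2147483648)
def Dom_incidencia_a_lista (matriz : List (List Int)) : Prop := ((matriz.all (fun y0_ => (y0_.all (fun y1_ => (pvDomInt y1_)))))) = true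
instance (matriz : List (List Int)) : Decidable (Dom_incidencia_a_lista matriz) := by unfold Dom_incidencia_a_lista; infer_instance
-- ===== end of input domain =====

-- B replaces A's per-vertex rescans of each row by one dict-building pass per row
-- plus a sorted walk over the discovered value groups (faster).


-- ===== PORT A =====
-- lista_indices: loop over range(len(lista)); lista[i] is always in range here, so
-- List.getD is exact for Python's lista[i].
def lista_indices (lista : List Int) (elemento : Int) : List Int :=
  (List.range lista.length).foldl
    (fun indices i => if lista.getD i 0 == elemento then indices ++ [(i : Int)] else indices) []

-- matriz[0] raises IndexError on matriz = []; excluded by Pre_, headD [] there is unreachable.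
-- matriz[i] with i < len(matriz) is exact as getD.
def incidencia_a_lista (matriz : List (List Int)) : List Int × List (List Int) :=
  let cantVertices := (matriz.headD []).length
  let cantAristas := matriz.length
  let vertices := (List.range cantVertices).foldl (fun vs (j : Nat) => vs ++ [(j : Int)]) []
  let aristas := (List.range cantAristas).foldl
    (fun ar i => vertices.foldl
      (fun ar vertice =>
        let arista := lista_indices (matriz.getD i []) vertice
        if arista.length == 2 then ar ++ [arista] else ar) ar) []
  (vertices, aristas)

-- ===== PORT B =====
-- one pass: dict from in-range value x to its column indices; then sorted keys, keep groups of size 2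
def rowEdges (n : Nat) (fila : List Int) : List (List Int) :=
  let pos := (PySem.List.enumerate fila).foldl
    (fun d p => if 0 ≤ p.2 ∧ p.2 < (n : Int) then PySem.Dict.modify d p.2 [] (· ++ [p.1]) else d)
    PySem.Dict.empty
  (PySem.List.sorted (PySem.Dict.keys pos) (fun v => v) false).foldl
    (fun ar v =>
      let g := PySem.Dict.getD pos v []
      if g.length == 2 then ar ++ [g] else ar) []

def incidencia_a_lista_alt (matriz : List (List Int)) : List Int × List (List Int) :=
  let n := (matriz.headD []).length
  let aristas := matriz.foldl (fun ar fila => ar ++ rowEdges n fila) []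
  ((List.range n).map (fun (j : Nat) => (j : Int)), aristas)

-- ===== PRECONDITION & SPEC =====
-- Pre_ excludes only matriz = [], on which Python A raises IndexError (matriz[0]); B raises there too.
def Pre_incidencia_a_lista (matriz : List (List Int)) : Prop := matriz ≠ []
instance (matriz : List (List Int)) : Decidable (Pre_incidencia_a_lista matriz) := by unfold Pre_incidencia_a_lista; infer_instance
def pvWitness_incidencia_a_lista : List (List Int) := [[0, 1]]

def Spec_incidencia_a_lista (matriz : List (List Int)) (out : List Int × List (List Int)) : Prop := out = incidencia_a_lista_alt matriz
instance (matriz : List (List Int)) (out : List Int × List (List Int)) : Decidable (Spec_incidencia_a_lista matriz out) := by unfold Spec_incidencia_a_lista; infer_instance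

-- ===== CLAIM (what is proved, stated in full; the proofs are below) =====
def Claim_equal_incidencia_a_lista : Prop := ∀ (matriz : List (List Int)), Dom_incidencia_a_lista matriz → Pre_incidencia_a_lista matriz → Spec_incidencia_a_lista matriz (incidencia_a_lista matriz)

-- ===== LEMMAS AND PROOFS =====

theorem range_map_getD {α : Type} (l : List α) (d : α) :
    (List.range l.length).map (fun i => l.getD i d) = l := by
  apply List.ext_getElem
  · simp
  · intro i h1 h2
    simp [List.getElem?_eq_getElem h2]

theorem lista_indices_eq (fila : List Int) (v : Int) :
    lista_indices fila v
      = ((List.range fila.length).filter (fun i => fila.getD i 0 == v)).map (fun i : Nat => (i : Int)) := by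
  unfold lista_indices
  rw [PySem.List.foldl_append_if (fun i => fila.getD i 0 == v) (fun i => (i : Int))]
  simp [List.map_eq_flatMap]

theorem enumerate_eq (fila : List Int) :
    PySem.List.enumerate fila
      = (List.range fila.length).map (fun (k : Nat) => ((k : Int), fila.getD k 0)) := by
  rw [PySem.List.enumerate_eq_map_pyRange fila 0]
  have : PySem.List.len fila = (fila.length : Int) := by simp [PySem.List.len]
  rw [this, PySem.List.pyRange_zero_natCast, List.map_map]
  apply List.map_congr_left
  intro k _
  simp [PySem.List.pyGetD_natCast]


theorem mem_of_lista_indices (fila : List Int) (v : Int)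
    (h : (lista_indices fila v).length = 2) : v ∈ fila := by
  rw [lista_indices_eq] at h
  have hne : ((List.range fila.length).filter (fun i => fila.getD i 0 == v)) ≠ [] := by
    intro hnil
    rw [hnil] at h
    simp at h
  obtain ⟨i, hi⟩ := List.exists_mem_of_ne_nil _ hne
  rw [List.mem_filter] at hi
  obtain ⟨hir, hpi⟩ := hi
  rw [List.mem_range] at hir
  have : fila.getD i 0 = v := by simpa using hpi
  rw [List.getD_eq_getElem fila 0 hir] at this
  exact this ▸ List.getElem_mem hir

theorem row_eq (n : Nat) (fila : List Int) (ar : List (List Int)) :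
    ((List.range n).map (fun k : Nat => (k : Int))).foldl
      (fun ar vertice =>
        let arista := lista_indices fila vertice
        if arista.length == 2 then ar ++ [arista] else ar) ar
    = ar ++ rowEdges n fila := by
  simp only [rowEdges]
  set q : Int → Bool := fun x => decide (0 ≤ x ∧ x < (n : Int)) with hq
  set G : Nat → Int := fun k => fila.getD k 0 with hG
  set l' : List (Int × Int) :=
    ((PySem.List.enumerate fila).filter (fun p => q p.2)).map (fun p => (p.2, p.1)) with hl'
  have hpos : (PySem.List.enumerate fila).foldl
      (fun d p => if 0 ≤ p.2 ∧ p.2 < (n : Int) then PySem.Dict.modify d p.2 [] (· ++ [p.1]) else d)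
      PySem.Dict.empty
      = l'.foldl (fun d p => PySem.Dict.modify d p.1 [] (fun xs => xs ++ [p.2])) PySem.Dict.empty := by
    rw [hl', List.foldl_map, List.foldl_filter]
    have hstep : (fun (d : PySem.Dict Int (List Int)) (p : Int × Int) =>
        if 0 ≤ p.2 ∧ p.2 < (n : Int) then PySem.Dict.modify d p.2 [] (· ++ [p.1]) else d)
        = (fun d p => if q p.2 = true then PySem.Dict.modify d (p.2, p.1).1 [] (fun xs => xs ++ [(p.2, p.1).2]) else d) := by
      funext d p
      simp [hq]
    rw [hstep]
  rw [hpos]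
  have hl'2 : l' = (((List.range fila.length).filter (fun k => q (G k))).map (fun k => (G k, (k : Int)))) := by
    rw [hl', enumerate_eq, List.filter_map, List.map_map]
    rfl
  have hget : ∀ v : Int, q v = true →
      (l'.foldl (fun d p => PySem.Dict.modify d p.1 [] (fun xs => xs ++ [p.2])) PySem.Dict.empty).getD v []
        = lista_indices fila v := by
    intro v hv
    rw [PySem.Dict.getD_foldl_modify_append l' PySem.Dict.empty v, PySem.Dict.getD_empty]
    rw [hl'2, List.filter_map, List.map_map]
    rw [lista_indices_eq]
    have heq : List.filter ((fun (p : Int × Int) => p.1 == v) ∘ fun k => (G k, (k : Int)))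
        (List.filter (fun k => q (G k)) (List.range fila.length))
        = List.filter (fun i => fila.getD i 0 == v) (List.range fila.length) := by
      rw [List.filter_filter]
      apply List.filter_congr
      intro k _
      show ((G k == v) && q (G k)) = (G k == v)
      by_cases h : G k = v
      · rw [h, hv, Bool.and_true]
      · rw [beq_eq_false_iff_ne.mpr h, Bool.false_and]
    rw [heq, List.nil_append]
    rfl
  have hkeys : (l'.foldl (fun d p => PySem.Dict.modify d p.1 [] (fun xs => xs ++ [p.2])) PySem.Dict.empty).keys
      = PySem.Set.ofList (fila.filter q) := by
    rw [PySem.Dict.keys_foldl_modify_key l' (fun p => p.1) [] (fun _ p => fun xs => xs ++ [p.2]) PySem.Dict.empty]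
    rw [PySem.Dict.keys_empty, PySem.Set.update_nil_left]
    congr 1
    rw [hl'2, List.map_map]
    conv_rhs => rw [← range_map_getD fila 0]
    rw [List.filter_map]
    rfl
  set keysList := (l'.foldl (fun d p => PySem.Dict.modify d p.1 [] (fun xs => xs ++ [p.2])) PySem.Dict.empty).keys with hk
  have hmemkeys : ∀ v : Int, v ∈ keysList ↔ (v ∈ fila ∧ q v = true) := by
    intro v
    rw [hkeys, PySem.Set.mem_ofList, List.mem_filter]
  have hmemR : ∀ v : Int, v ∈ (List.range n).map (fun k : Nat => (k : Int)) ↔ q v = true := by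
    intro v
    rw [hq]
    simp only [List.mem_map, List.mem_range, decide_eq_true_eq]
    constructor
    · rintro ⟨k, hk1, rfl⟩
      omega
    · rintro ⟨h0, hn⟩
      exact ⟨v.toNat, by omega, by omega⟩
  have hsorted : PySem.List.sorted keysList (fun v => v)
      = ((List.range n).map (fun k : Nat => (k : Int))).filter (fun v => decide (v ∈ keysList)) := by
    apply PySem.List.sorted_eq_of_perm_of_pairwise_lt
    · rw [List.perm_ext_iff_of_nodup]
      · intro v
        rw [List.mem_filter]
        simp only [decide_eq_true_eq]
        constructor
        · rintro ⟨_, h⟩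
          exact h
        · intro h
          exact ⟨(hmemR v).2 ((hmemkeys v).1 h).2, h⟩
      · exact (List.nodup_range.map Nat.cast_injective).filter _
      · show keysList.Nodup
        rw [hkeys]
        exact PySem.Set.nodup_ofList _
    · exact List.Pairwise.filter _
        (List.Pairwise.map (fun k : Nat => (k : Int)) (fun a b h => by simpa using h) List.pairwise_lt_range)
  rw [hsorted]
  rw [PySem.List.foldl_append_if (fun v => (lista_indices fila v).length == 2) (fun v => lista_indices fila v)]
  rw [PySem.List.foldl_append_if _ _ _ ([] : List (List Int))]
  rw [List.nil_append, List.filter_filter]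
  congr 1
  have hfe : ∀ v ∈ (List.range n).map (fun k : Nat => (k : Int)),
      ((lista_indices fila v).length == 2)
        = ((((l'.foldl (fun d p => PySem.Dict.modify d p.1 [] (fun xs => xs ++ [p.2])) PySem.Dict.empty).getD v []).length == 2) && decide (v ∈ keysList)) := by
    intro v hv
    have hqv := (hmemR v).1 hv
    rw [hget v hqv]
    by_cases h2 : (lista_indices fila v).length = 2
    · have hvk : v ∈ keysList := (hmemkeys v).2 ⟨mem_of_lista_indices fila v h2, hqv⟩
      simp [h2, hvk]
    · simp [h2]
  rw [← List.filter_congr hfe]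
  apply List.map_congr_left
  intro v hv
  rw [List.mem_filter] at hv
  exact (hget v ((hmemR v).1 hv.1)).symm

theorem fold_rows (l : List (List Int)) (n : Nat) :
    (List.range l.length).foldl
      (fun ar i => ((List.range n).map (fun k : Nat => (k : Int))).foldl
        (fun ar vertice =>
          let arista := lista_indices (l.getD i []) vertice
          if arista.length == 2 then ar ++ [arista] else ar) ar) []
    = l.foldl (fun ar fila => ar ++ rowEdges n fila) [] := by
  have h1 : l.foldl (fun ar fila => ar ++ rowEdges n fila) ([] : List (List Int))
      = ((List.range l.length).map (fun i => l.getD i [])).foldl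
          (fun ar fila => ar ++ rowEdges n fila) [] := by
    rw [range_map_getD]
  rw [h1, List.foldl_map]
  have hstep : (fun (ar : List (List Int)) (i : Nat) =>
      ((List.range n).map (fun k : Nat => (k : Int))).foldl
        (fun ar vertice =>
          let arista := lista_indices (l.getD i []) vertice
          if arista.length == 2 then ar ++ [arista] else ar) ar)
      = (fun ar i => ar ++ rowEdges n (l.getD i [])) :=
    funext fun ar => funext fun i => row_eq n (l.getD i []) ar
  rw [hstep]

-- ===== VERDICT (by name: the statement is the Claim_ definition above) =====
theorem incidencia_a_lista_spec : Claim_equal_incidencia_a_lista := by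
  intro matriz _ _
  unfold Spec_incidencia_a_lista
  simp only [incidencia_a_lista, incidencia_a_lista_alt]
  rw [PySem.List.foldl_append_singleton_eq_map (fun j : Nat => (j : Int)), List.nil_append]
  exact congrArg _ (fold_rows matriz (matriz.headD []).length)
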